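-- pv_equiv track=rewrite | github.com/OmerHassan/code-eval | p087.py | query
-- ===== SOURCE A (Python) =====
-- def query(lineIndex, numElements, statements, isColumn):
-- 	'''
-- 	Algorithm:
-- 		Disregard any SetCol statements which don't affect column at
-- 		`lineIndex`.
-- 		This leaves us with at most one SetCol statement and any number of
-- 		SetRow statements.
-- 		Also disregard any SetRow statements that occur before SetCol.
--
-- 		columnSum = (numElements - len(setRowStatementsFollowingSetCol)) *
-- 			columnValue + sum(setRowStatementsFollowingSetCol)
--
-- 	Parameters
-- 	----------
-- 	lineIndex:int
-- 		Index of line (row or column) whose sum is required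
-- 	numElements:int
-- 		Number of elements in the line (row or column)
-- 	statements:list
-- 		Preceding SetCol and SetRow statements. Each element of the list is a
-- 		list with three elements [command, index, value] where `command` can be
-- 		either "SetRow" or "SetCol".
-- 	isColumn:boolean
-- 		Whether to sum column values
--
-- 	Returns
-- 	-------
-- 	int
-- 		Sum of all elements in column at index `lineIndex`
-- 	'''
-- 	PARALLEL_COMMAND = 'SetCol' if isColumn else 'SetRow'
-- 	PERPENDICULAR_COMMAND = 'SetRow' if isColumn else 'SetCol'
--
-- 	# index of SetCol statement. Only the SetRow statements occurring after this
-- 	# index take effect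
-- 	setColIndex = -1
-- 	columnValue = 0
--
-- 	for (index, statement) in enumerate(statements):
-- 		if statement[0] == PARALLEL_COMMAND and statement[1] == lineIndex:
-- 			columnValue = statement[2]
-- 			setColIndex = index
--
-- 	rowIndexToValueMap = {}
--
-- 	for (index, statement) in enumerate(statements):
-- 		if index > setColIndex and statement[0] == PERPENDICULAR_COMMAND:
-- 			rowIndexToValueMap[str(statement[1])] = statement[2]
--
-- 	setRowStatementValues = rowIndexToValueMap.values()
--
-- 	return (numElements - len(setRowStatementValues)) * columnValue + sum(setRowStatementValues)
-- ===== SOURCE B (Python) =====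
-- def query(lineIndex, numElements, statements, isColumn):
-- 	parallelCommand = 'SetCol' if isColumn else 'SetRow'
-- 	perpendicularCommand = 'SetRow' if isColumn else 'SetCol'
--
-- 	seen = set()
-- 	total = 0
-- 	columnValue = 0
--
-- 	# Walk the statements backwards: the first parallel hit is the one that
-- 	# counts (last write wins), and everything before it is irrelevant.
-- 	for command, index, value in reversed(statements):
-- 		if command == parallelCommand and index == lineIndex:
-- 			columnValue = value
-- 			break
-- 		if command == perpendicularCommand and index not in seen:
-- 			seen.add(index)
-- 			total += value
-- 	return (numElements - len(seen)) * columnValue + total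
-- ===== Notes on version B (the rewrite author's own statement) =====
-- stated objective: simpler
-- what changed: Replaces A's two forward passes (last-match scan, then a str-keyed dict of row writes after it) by one backward pass that stops at the first parallel match and dedups perpendicular rows with a set while summing.
import Mathlib
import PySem

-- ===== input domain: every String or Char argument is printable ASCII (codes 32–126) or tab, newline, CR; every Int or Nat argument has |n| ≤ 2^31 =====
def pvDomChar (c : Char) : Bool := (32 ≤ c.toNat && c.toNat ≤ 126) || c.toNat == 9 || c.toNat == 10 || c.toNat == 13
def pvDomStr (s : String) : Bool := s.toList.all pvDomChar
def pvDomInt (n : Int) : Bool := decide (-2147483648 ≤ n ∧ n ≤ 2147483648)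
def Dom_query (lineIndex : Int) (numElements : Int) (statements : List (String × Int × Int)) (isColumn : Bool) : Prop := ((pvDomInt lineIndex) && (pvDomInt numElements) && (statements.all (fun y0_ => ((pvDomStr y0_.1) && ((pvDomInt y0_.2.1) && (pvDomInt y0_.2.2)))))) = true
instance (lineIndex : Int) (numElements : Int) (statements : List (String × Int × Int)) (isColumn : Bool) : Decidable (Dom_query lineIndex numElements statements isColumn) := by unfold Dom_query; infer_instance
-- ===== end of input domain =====

-- B replaces A's two forward passes (last-match scan + str-keyed dict of later row writes)
-- by one backward pass with a seen-set that stops at the first parallel match; objective: simpler.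


-- ===== PORT A =====
-- first loop: remember index and value of the last parallel statement hitting lineIndex
def queryLoop1 (PARALLEL : String) (lineIndex : Int) (statements : List (String × Int × Int)) : Int × Int :=
  (PySem.List.enumerate statements).foldl
    (fun st p => if p.2.1 == PARALLEL && p.2.2.1 == lineIndex then (p.1, p.2.2.2) else st)
    (-1, 0)

-- second loop: dict of perpendicular writes occurring after setColIndex, keyed by str(index)
def queryLoop2 (PERPENDICULAR : String) (setColIndex : Int) (statements : List (String × Int × Int)) : PySem.Dict String Int :=
  (PySem.List.enumerate statements).foldl
    (fun d p => if decide (setColIndex < p.1) && p.2.1 == PERPENDICULAR then d.insert (PySem.Int.toStr p.2.2.1) p.2.2.2 else d)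
    PySem.Dict.empty

def query (lineIndex : Int) (numElements : Int) (statements : List (String × Int × Int)) (isColumn : Bool) : Int :=
  let PARALLEL_COMMAND := if isColumn then "SetCol" else "SetRow"
  let PERPENDICULAR_COMMAND := if isColumn then "SetRow" else "SetCol"
  let scv := queryLoop1 PARALLEL_COMMAND lineIndex statements
  let rowIndexToValueMap := queryLoop2 PERPENDICULAR_COMMAND scv.1 statements
  let setRowStatementValues := rowIndexToValueMap.values
  (numElements - (setRowStatementValues.length : Int)) * scv.2 + setRowStatementValues.sum

-- ===== PORT B =====
-- backward walk: break at the first parallel hit, dedup perpendicular rows with a seen-set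
def queryAltGo (par perp : String) (lineIndex : Int) :
    List (String × Int × Int) → PySem.Set Int → Int → Int × PySem.Set Int × Int
  | [], seen, total => (0, seen, total)
  | (c, i, v) :: rest, seen, total =>
    if c == par && i == lineIndex then (v, seen, total)
    else if c == perp && !(PySem.Set.contains seen i) then
      queryAltGo par perp lineIndex rest (PySem.Set.add seen i) (total + v)
    else queryAltGo par perp lineIndex rest seen total

def query_alt (lineIndex : Int) (numElements : Int) (statements : List (String × Int × Int)) (isColumn : Bool) : Int :=
  let parallelCommand := if isColumn then "SetCol" else "SetRow"
  let perpendicularCommand := if isColumn then "SetRow" else "SetCol"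
  let r := queryAltGo parallelCommand perpendicularCommand lineIndex statements.reverse PySem.Set.empty 0
  (numElements - (r.2.1.length : Int)) * r.1 + r.2.2


-- ===== PRECONDITION & SPEC =====
def Spec_query (lineIndex : Int) (numElements : Int) (statements : List (String × Int × Int)) (isColumn : Bool) (out : Int) : Prop := out = query_alt lineIndex numElements statements isColumn
instance (lineIndex : Int) (numElements : Int) (statements : List (String × Int × Int)) (isColumn : Bool) (out : Int) : Decidable (Spec_query lineIndex numElements statements isColumn out) := by unfold Spec_query; infer_instance

-- ===== CLAIM (what is proved, stated in full; the proofs are below) =====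
def Claim_equal_query : Prop := ∀ (lineIndex : Int) (numElements : Int) (statements : List (String × Int × Int)) (isColumn : Bool), Dom_query lineIndex numElements statements isColumn → Spec_query lineIndex numElements statements isColumn (query lineIndex numElements statements isColumn)

-- ===== LEMMAS AND PROOFS =====

/- ## Characterisation of A's two loops over the reversed statement list -/

def pvIsPar (P : String) (li : Int) (s : String × Int × Int) : Bool := s.1 == P && s.2.1 == li

-- value of the last parallel hit, read off the reversed list
def pvCV (P : String) (li : Int) : List (String × Int × Int) → Int
  | [] => 0
  | s :: r => if pvIsPar P li s then s.2.2 else pvCV P li r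

-- reversed suffix after the last parallel hit
def pvSuf (P : String) (li : Int) : List (String × Int × Int) → List (String × Int × Int)
  | [] => []
  | s :: r => if pvIsPar P li s then [] else s :: pvSuf P li r

-- A's dict, rebuilt from the reversed suffix (head of the list is the winning, last write)
def pvDict (Q : String) : List (String × Int × Int) → PySem.Dict String Int
  | [] => PySem.Dict.empty
  | s :: r => if s.1 == Q then (pvDict Q r).insert (PySem.Int.toStr s.2.1) s.2.2 else pvDict Q r

-- B's accumulation over the reversed suffix
def pvDedup (Q : String) : List (String × Int × Int) → PySem.Set Int → Int → PySem.Set Int × Int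
  | [], seen, total => (seen, total)
  | s :: r, seen, total =>
    if s.1 == Q && !(PySem.Set.contains seen s.2.1) then
      pvDedup Q r (PySem.Set.add seen s.2.1) (total + s.2.2)
    else pvDedup Q r seen total

lemma pvGo_char (P Q : String) (li : Int) :
    ∀ (ys : List (String × Int × Int)) (seen : PySem.Set Int) (total : Int),
      queryAltGo P Q li ys seen total = (pvCV P li ys, pvDedup Q (pvSuf P li ys) seen total) := by
  intro ys
  induction ys with
  | nil => intro seen total; simp [queryAltGo, pvCV, pvSuf, pvDedup]
  | cons s r ih =>
    intro seen total
    obtain ⟨c, i, v⟩ := s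
    by_cases h : (c == P && i == li) = true
    · simp [queryAltGo, h, pvCV, pvSuf, pvIsPar, pvDedup]
    · have hp : pvIsPar P li (c, i, v) = false := by
        simpa [pvIsPar] using h
      rw [show pvCV P li ((c, i, v) :: r) = pvCV P li r from by simp [pvCV, hp]]
      rw [show pvSuf P li ((c, i, v) :: r) = (c, i, v) :: pvSuf P li r from by simp [pvSuf, hp]]
      simp only [queryAltGo, pvDedup]
      rw [if_neg h]
      by_cases h2 : (c == Q && !(PySem.Set.contains seen i)) = true
      · rw [if_pos h2, if_pos h2, ih]
      · rw [if_neg h2, if_neg h2, ih]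

lemma pvLoop1_char (P P' : String) (li : Int) (xs : List (String × Int × Int)) :
    (queryLoop1 P li xs).2 = pvCV P li xs.reverse ∧
    -1 ≤ (queryLoop1 P li xs).1 ∧ (queryLoop1 P li xs).1 < (xs.length : Int) ∧
    queryLoop2 P' (queryLoop1 P li xs).1 xs = pvDict P' (pvSuf P li xs.reverse) := by
  induction xs using List.reverseRecOn with
  | nil =>
    refine ⟨rfl, by simp [queryLoop1, PySem.List.enumerate],
      by simp [queryLoop1, PySem.List.enumerate], ?_⟩
    simp [queryLoop1, queryLoop2, PySem.List.enumerate, pvDict, pvSuf]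
  | append_singleton xs s ih =>
    obtain ⟨ih1, ih2, ih3, ih4⟩ := ih
    have henum : PySem.List.enumerate (xs ++ [s]) 0
        = PySem.List.enumerate xs 0 ++ [((xs.length : Int), s)] := by
      rw [PySem.List.enumerate_append]
      simp [PySem.List.enumerate]
    have hL1 : queryLoop1 P li (xs ++ [s])
        = if pvIsPar P li s then ((xs.length : Int), s.2.2) else queryLoop1 P li xs := by
      simp only [queryLoop1, henum, List.foldl_append, List.foldl]
      cases hp : pvIsPar P li s <;> simp_all [pvIsPar]
    by_cases hp : pvIsPar P li s = true
    · rw [hL1, if_pos hp]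
      refine ⟨by simp [pvCV, hp], by omega,
        by simp only [List.length_append, List.length_singleton]; push_cast; omega, ?_⟩
      simp only [List.reverse_append, List.reverse_singleton, List.singleton_append, pvSuf, hp, if_pos]
      -- dict is empty: no enumerate index exceeds xs.length
      simp only [queryLoop2, henum]
      rw [PySem.List.foldl_congr_mem _ _ (fun d _ => d) _ ?_]
      · have hfix : ∀ (l : List (Int × (String × Int × Int))) (init : PySem.Dict String Int),
            l.foldl (fun d _ => d) init = init := by
          intro l
          induction l with
          | nil => intro init; rfl
          | cons a t iht => intro init; simp only [List.foldl]; exact iht init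
        rw [hfix]
        simp [pvDict]
      · intro acc p hpmem
        rcases List.mem_append.1 hpmem with hmem | hmem
        · obtain ⟨k, hk, rfl⟩ := (PySem.List.mem_enumerate_iff _ _ _).1 hmem
          have hc : ¬ ((xs.length : Int) < 0 + (k : Int)) := by omega
          rw [decide_eq_false hc, Bool.false_and, if_neg (by simp)]
        · simp only [List.mem_singleton] at hmem
          subst hmem
          simp
    · rw [hL1, if_neg (by simp [hp])]
      refine ⟨?_, ih2, by simp only [List.length_append, List.length_singleton]; push_cast; omega, ?_⟩
      · simpa [pvCV, hp] using ih1
      · simp only [List.reverse_append, List.reverse_singleton, List.singleton_append, pvSuf, hp,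
          Bool.false_eq_true, if_false]
        simp only [queryLoop2, henum, List.foldl_append, List.foldl] at *
        rw [ih4]
        have hlt : (queryLoop1 P li xs).1 < (xs.length : Int) := ih3
        cases hq : (s.1 == P') <;> simp [pvDict, hq, hlt]

def pvDigits (n : Nat) : List Char :=
  if n / 10 = 0 then [Nat.digitChar (n % 10)]
  else pvDigits (n / 10) ++ [Nat.digitChar (n % 10)]
decreasing_by omega
def pvEv (a : Nat) (l : List Char) : Nat := l.foldl (fun a c => 10 * a + (c.toNat - 48)) a
lemma pvDigitChar_toNat {k : Nat} (h : k < 10) : (Nat.digitChar k).toNat = 48 + k := by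
  interval_cases k <;> decide

lemma pvEv_digits (n : Nat) : ∀ a, pvEv a (pvDigits n) = a * 10 ^ (pvDigits n).length + n := by
  induction n using Nat.strong_induction_on with
  | _ n ih =>
    intro a
    rw [pvDigits]
    split
    · next h =>
      simp [pvEv, List.foldl, pvDigitChar_toNat (Nat.mod_lt n (by omega))]
      omega
    · next h =>
      have hlt : n / 10 < n := by omega
      have ihh := ih (n / 10) hlt
      simp only [pvEv, List.foldl_append, List.foldl] at *
      rw [ihh a]
      simp [List.length_append, pvDigitChar_toNat (Nat.mod_lt n (by omega)), pow_succ]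
      ring_nf
      omega

lemma pvDigits_ge_48 (n : Nat) : ∀ c ∈ pvDigits n, 48 ≤ c.toNat := by
  induction n using Nat.strong_induction_on with
  | _ n ih =>
    intro c hc
    rw [pvDigits] at hc
    split at hc
    · simp at hc
      subst hc
      rw [pvDigitChar_toNat (Nat.mod_lt n (by omega))]; omega
    · next h =>
      rcases List.mem_append.1 hc with h1 | h1
      · exact ih (n / 10) (by omega) c h1
      · simp at h1; subst h1
        rw [pvDigitChar_toNat (Nat.mod_lt n (by omega))]; omega

lemma pvToDigitsCore_eq : ∀ (f n : Nat) (ds : List Char), n ≤ f →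
    Nat.toDigitsCore 10 (f + 1) n ds = pvDigits n ++ ds := by
  intro f
  induction f with
  | zero =>
    intro n ds hn
    have : n = 0 := by omega
    subst this
    rw [pvDigits]
    simp [Nat.toDigitsCore]
  | succ f ihf =>
    intro n ds hn
    show (if n / 10 = 0 then (n % 10).digitChar :: ds
          else Nat.toDigitsCore 10 (f+1) (n / 10) ((n % 10).digitChar :: ds)) = _
    split
    · next h => rw [pvDigits]; simp [h]
    · next h =>
      rw [ihf (n / 10) _ (by omega)]
      conv_rhs => rw [pvDigits]
      simp [h]

lemma pvDigits_inj {m n : Nat} (h : pvDigits m = pvDigits n) : m = n := by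
  have hm := pvEv_digits m 0
  have hn := pvEv_digits n 0
  rw [h] at hm
  omega

lemma pvToDigits_eq (n : Nat) : Nat.toDigits 10 n = pvDigits n := by
  have := pvToDigitsCore_eq n n [] le_rfl
  simpa [Nat.toDigits] using this

lemma pvToStr_inj : Function.Injective PySem.Int.toStr := by
  intro m n h
  have h2 : PySem.Int.toChars m = PySem.Int.toChars n := by
    rw [← PySem.Int.toList_toStr, ← PySem.Int.toList_toStr, h]
  simp only [PySem.Int.toChars, pvToDigits_eq] at h2
  split_ifs at h2 with hm hn hn
  · have := pvDigits_inj (List.cons.inj h2).2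
    omega
  · exfalso
    have : '-' ∈ pvDigits n.toNat := h2 ▸ List.mem_cons_self
    have := pvDigits_ge_48 _ _ this
    simp at this
  · exfalso
    have : '-' ∈ pvDigits m.toNat := h2 ▸ List.mem_cons_self
    have := pvDigits_ge_48 _ _ this
    simp at this
  · have := pvDigits_inj h2
    omega


lemma pvContains_map_toStr (seen : List Int) (i : Int) :
    (seen.map PySem.Int.toStr).contains (PySem.Int.toStr i) = seen.contains i := by
  by_cases h : i ∈ seen
  · have hm : PySem.Int.toStr i ∈ seen.map PySem.Int.toStr := List.mem_map_of_mem h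
    simp [h, hm]
  · have hm : PySem.Int.toStr i ∉ seen.map PySem.Int.toStr :=
      fun hc => h ((List.mem_map_of_injective pvToStr_inj).1 hc)
    simp [h, hm]

lemma pvDict_nodup_keys (Q : String) (l : List (String × Int × Int)) :
    (pvDict Q l).keys.Nodup := by
  induction l with
  | nil => exact PySem.Dict.nodup_keys_empty
  | cons s r ih =>
    rw [pvDict]
    split
    · exact PySem.Dict.nodup_keys_insert _ _ _ ih
    · exact ih

lemma pvReplacePerm (L : List (String × Int)) (k : String) (v : Int)
    (hnd : (L.map (·.1)).Nodup) (hk : k ∈ L.map (·.1)) :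
    (L.map (fun p => if p.1 == k then (k, v) else p)).Perm
      ((k, v) :: L.filter (fun p => !(p.1 == k))) := by
  induction L with
  | nil => simp at hk
  | cons q t ih =>
    simp only [List.map_cons, List.nodup_cons] at hnd hk
    by_cases hq : (q.1 == k) = true
    · have hqk : q.1 = k := by simpa using hq
      have hknot : k ∉ t.map (·.1) := hqk ▸ hnd.1
      have hmapid : t.map (fun p => if p.1 == k then (k, v) else p) = t := by
        conv_rhs => rw [← List.map_id' t]
        apply List.map_congr_left
        intro p hp
        have : (p.1 == k) = false := by
          simp only [beq_eq_false_iff_ne]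
          exact fun hpk => hknot (hpk ▸ List.mem_map_of_mem hp)
        simp [this]
      have hfid : t.filter (fun p => !(p.1 == k)) = t := by
        apply List.filter_eq_self.2
        intro p hp
        simp only [Bool.not_eq_eq_eq_not, Bool.not_true, beq_eq_false_iff_ne]
        exact fun hpk => hknot (hpk ▸ List.mem_map_of_mem hp)
      rw [List.map_cons, hmapid, List.filter_cons]
      simp [hq, hfid]
    · have hkt : k ∈ t.map (·.1) := by
        rcases List.mem_cons.1 hk with h1 | h1
        · exact absurd h1.symm (by simpa using hq)
        · exact h1
      have ihh := ih hnd.2 hkt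
      simp only [List.map_cons, List.filter_cons, hq, Bool.not_false, if_pos]
      exact (ihh.cons q).trans (List.Perm.swap _ _ _)

lemma pvCrux (Q : String) :
    ∀ (l : List (String × Int × Int)) (seen : PySem.Set Int) (total : Int), seen.Nodup →
      (pvDedup Q l seen total).1.Nodup ∧
      (pvDedup Q l seen total).1.length =
        seen.length + (((pvDict Q l).items.filter
          (fun p => !(List.contains (seen.map PySem.Int.toStr) p.1))).length) ∧
      (pvDedup Q l seen total).2 =
        total + (((pvDict Q l).items.filter
          (fun p => !(List.contains (seen.map PySem.Int.toStr) p.1))).map (·.2)).sum := by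
  intro l
  induction l with
  | nil =>
    intro seen total hnd
    refine ⟨hnd, ?_, ?_⟩ <;>
      simp [pvDedup, pvDict, (show (PySem.Dict.empty : PySem.Dict String Int).items = [] from rfl)]
  | cons s r ih =>
    intro seen total hnd
    by_cases hq : (s.1 == Q) = true
    · by_cases hmem : s.2.1 ∈ seen
      · -- already seen: statement is shadowed
        have hcontains : PySem.Set.contains seen s.2.1 = true := by
          rw [PySem.Set.contains_eq_listContains]
          exact List.elem_eq_true_of_mem hmem
        have hded : pvDedup Q (s :: r) seen total = pvDedup Q r seen total := by
          rw [pvDedup, if_neg (by simp [hq, PySem.Set.contains_eq_listContains, hmem])]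
        have hkS : (seen.map PySem.Int.toStr).contains (PySem.Int.toStr s.2.1) = true := by
          rw [pvContains_map_toStr]; exact List.elem_eq_true_of_mem hmem
        have hfilt :
            ((pvDict Q (s :: r)).items.filter
              (fun p => !(List.contains (seen.map PySem.Int.toStr) p.1))) =
            ((pvDict Q r).items.filter
              (fun p => !(List.contains (seen.map PySem.Int.toStr) p.1))) := by
          rw [pvDict, if_pos hq]
          by_cases hc : (pvDict Q r).contains (PySem.Int.toStr s.2.1) = true
          · rw [PySem.Dict.items_insert_of_contains _ _ hc]
            rw [List.filter_map]
            have hpred : ∀ p ∈ (pvDict Q r).items,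
                ((fun p => !(List.contains (seen.map PySem.Int.toStr) p.1)) ∘
                  (fun p => if (p.1 == PySem.Int.toStr s.2.1) = true
                    then (PySem.Int.toStr s.2.1, s.2.2) else p)) p
                = (fun p => !(List.contains (seen.map PySem.Int.toStr) p.1)) p := by
              intro p _
              by_cases hpk : (p.1 == PySem.Int.toStr s.2.1) = true
              · have : p.1 = PySem.Int.toStr s.2.1 := by simpa using hpk
                simp [Function.comp, this]
              · simp [Function.comp, hpk]
            rw [List.filter_congr hpred]
            conv_rhs => rw [← List.map_id' (List.filter _ (pvDict Q r).items)]
            apply List.map_congr_left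
            intro p hp
            have hpmem := List.of_mem_filter hp
            have : (p.1 == PySem.Int.toStr s.2.1) = false := by
              rcases Bool.eq_false_or_eq_true (p.1 == PySem.Int.toStr s.2.1) with h | h
              swap
              · exact h
              · exfalso
                have : p.1 = PySem.Int.toStr s.2.1 := by simpa using h
                rw [this, hkS] at hpmem
                simp at hpmem
            simp [this]
          · rw [PySem.Dict.items_insert_of_not_contains _ _ (by simpa using hc)]
            rw [List.filter_append]
            have hnilf : List.filter (fun p => !(List.contains (seen.map PySem.Int.toStr) p.1))
                [(PySem.Int.toStr s.2.1, s.2.2)] = [] := by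
              simp only [List.filter, hkS, Bool.not_true]
            rw [hnilf, List.append_nil]
        rw [hded, hfilt]
        exact ih seen total hnd
      · -- fresh index
        have hcontains : PySem.Set.contains seen s.2.1 = false := by
          rw [PySem.Set.contains_eq_listContains]
          simp only [List.contains_eq_mem, decide_eq_false_iff_not]; exact hmem
        have hded : pvDedup Q (s :: r) seen total
            = pvDedup Q r (seen ++ [s.2.1]) (total + s.2.2) := by
          rw [pvDedup, if_pos (by simp [hq, PySem.Set.contains_eq_listContains, hmem]), PySem.Set.add_of_not_mem hmem]
        have hnd' : (seen ++ [s.2.1]).Nodup := by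
          exact hnd.append (List.nodup_singleton _) (by simpa [List.disjoint_singleton] using hmem)
        have hkS : (seen.map PySem.Int.toStr).contains (PySem.Int.toStr s.2.1) = false := by
          rw [pvContains_map_toStr]
          simp only [List.contains_eq_mem, decide_eq_false_iff_not]; exact hmem
        obtain ⟨c1, c2, c3⟩ := ih (seen ++ [s.2.1]) (total + s.2.2) hnd'
        -- relate the two filtered item lists
        have hSapp : (seen ++ [s.2.1]).map PySem.Int.toStr
            = seen.map PySem.Int.toStr ++ [PySem.Int.toStr s.2.1] := by simp
        have hmerge : ∀ L : List (String × Int),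
            (L.filter (fun p => !(List.contains ((seen ++ [s.2.1]).map PySem.Int.toStr) p.1)))
            = ((L.filter (fun p => !(p.1 == PySem.Int.toStr s.2.1))).filter
                (fun p => !(List.contains (seen.map PySem.Int.toStr) p.1))) := by
          intro L
          rw [List.filter_filter]
          apply List.filter_congr
          intro p _
          rw [hSapp, List.contains_append]
          simp only [List.contains_cons, List.contains_nil, Bool.or_false]
          cases h1 : List.contains (seen.map PySem.Int.toStr) p.1 <;>
            cases h2 : (PySem.Int.toStr s.2.1 == p.1) <;>
              simp_all [BEq.comm]
        have hkey : pvDict Q (s :: r)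
            = (pvDict Q r).insert (PySem.Int.toStr s.2.1) s.2.2 := by
          rw [pvDict, if_pos hq]
        by_cases hc : (pvDict Q r).contains (PySem.Int.toStr s.2.1) = true
        · -- replaced entry
          have hkmem : PySem.Int.toStr s.2.1 ∈ (pvDict Q r).items.map (·.1) :=
            (PySem.Dict.contains_iff_mem_keys _ _).1 hc
          have hperm := pvReplacePerm (pvDict Q r).items (PySem.Int.toStr s.2.1) s.2.2
            (pvDict_nodup_keys Q r) hkmem
          have hpermf := hperm.filter (fun p => !(List.contains (seen.map PySem.Int.toStr) p.1))
          rw [hkey, PySem.Dict.items_insert_of_contains _ _ hc]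
          have hcons :
              (((PySem.Int.toStr s.2.1, s.2.2) ::
                (pvDict Q r).items.filter (fun p => !(p.1 == PySem.Int.toStr s.2.1))).filter
                  (fun p => !(List.contains (seen.map PySem.Int.toStr) p.1)))
              = (PySem.Int.toStr s.2.1, s.2.2) ::
                (((pvDict Q r).items.filter (fun p => !(p.1 == PySem.Int.toStr s.2.1))).filter
                  (fun p => !(List.contains (seen.map PySem.Int.toStr) p.1))) := by
            rw [List.filter_cons]
            simp only [hkS, Bool.not_false]
            simp
          rw [hcons] at hpermf
          rw [hded]
          refine ⟨c1, ?_, ?_⟩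
          · rw [c2, hpermf.length_eq, hmerge]
            simp
            omega
          · rw [c3, hmerge, (hpermf.map (·.2)).sum_eq]
            simp
            ring
        · -- appended entry
          have hnotmem : PySem.Int.toStr s.2.1 ∉ (pvDict Q r).items.map (·.1) := by
            intro hmm
            exact absurd ((PySem.Dict.contains_iff_mem_keys _ _).2 hmm) hc
          have hsame :
              ((pvDict Q r).items.filter
                (fun p => !(List.contains ((seen ++ [s.2.1]).map PySem.Int.toStr) p.1)))
              = ((pvDict Q r).items.filter
                (fun p => !(List.contains (seen.map PySem.Int.toStr) p.1))) := by
            rw [hmerge]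
            congr 1
            apply List.filter_eq_self.2
            intro p hp
            have : (p.1 == PySem.Int.toStr s.2.1) = false := by
              simp only [beq_eq_false_iff_ne]
              exact fun hpk => hnotmem (hpk ▸ List.mem_map_of_mem hp)
            simp [this]
          rw [hkey, PySem.Dict.items_insert_of_not_contains _ _ (by simpa using hc), hded]
          refine ⟨c1, ?_, ?_⟩
          · rw [c2, hsame]
            rw [List.filter_append]
            have hkeep : List.filter (fun p => !(List.contains (seen.map PySem.Int.toStr) p.1))
                [(PySem.Int.toStr s.2.1, s.2.2)] = [(PySem.Int.toStr s.2.1, s.2.2)] := by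
              simp only [List.filter, hkS, Bool.not_false]
            rw [hkeep]
            simp
            omega
          · rw [c3, hsame]
            rw [List.filter_append]
            have hkeep : List.filter (fun p => !(List.contains (seen.map PySem.Int.toStr) p.1))
                [(PySem.Int.toStr s.2.1, s.2.2)] = [(PySem.Int.toStr s.2.1, s.2.2)] := by
              simp only [List.filter, hkS, Bool.not_false]
            rw [hkeep]
            simp
            ring
    · -- not a perpendicular statement
      have hded : pvDedup Q (s :: r) seen total = pvDedup Q r seen total := by
        rw [pvDedup, if_neg (by simp [hq])]
      have hkey : pvDict Q (s :: r) = pvDict Q r := by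
        rw [pvDict, if_neg hq]
      rw [hded, hkey]
      exact ih seen total hnd

lemma pvMain (P Q : String) (li n : Int) (xs : List (String × Int × Int)) :
    (n - (((queryLoop2 Q (queryLoop1 P li xs).1 xs).values.length : Int))) * (queryLoop1 P li xs).2
      + (queryLoop2 Q (queryLoop1 P li xs).1 xs).values.sum =
    (n - (((queryAltGo P Q li xs.reverse PySem.Set.empty 0).2.1.length : Int)))
      * (queryAltGo P Q li xs.reverse PySem.Set.empty 0).1
      + (queryAltGo P Q li xs.reverse PySem.Set.empty 0).2.2 := by
  obtain ⟨h1, -, -, h4⟩ := pvLoop1_char P Q li xs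
  rw [pvGo_char]
  obtain ⟨-, e2, e3⟩ := pvCrux Q (pvSuf P li xs.reverse) PySem.Set.empty 0 List.nodup_nil
  have hempty : (PySem.Set.empty : PySem.Set Int) = ([] : List Int) := rfl
  have hfilt :
      ((pvDict Q (pvSuf P li xs.reverse)).items.filter
        (fun p => !(List.contains ((PySem.Set.empty : PySem.Set Int).map PySem.Int.toStr) p.1)))
      = (pvDict Q (pvSuf P li xs.reverse)).items := by
    rw [hempty]
    simp
  rw [hfilt] at e2 e3
  have hv : (pvDict Q (pvSuf P li xs.reverse)).values
      = (pvDict Q (pvSuf P li xs.reverse)).items.map (·.2) := rfl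
  rw [h4, h1, hv, e2, e3]
  simp

-- ===== VERDICT (by name: the statement is the Claim_ definition above) =====
theorem query_spec : Claim_equal_query := by
  intro li n xs isc _
  unfold Spec_query query query_alt
  cases isc <;> exact pvMain _ _ li n xs
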